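-- pv_equiv track=rewrite | github.com/BertilBraun/Programming-Puzzles | solver.py | calculate_lookup_table_index
-- ===== SOURCE A (Python) =====
-- from typing import Iterable, Set
--
-- def calculate_lookup_table_index(buildings: Iterable[int], clue: int) -> int:
--     lookup_table_index = 0
--     lookup_table_index <<= 3
--     lookup_table_index += clue
--     for b in buildings:
--         lookup_table_index <<= 3
--         lookup_table_index += b
--     return lookup_table_index
-- ===== SOURCE B (Python) =====
-- def calculate_lookup_table_index(buildings, clue):
--     bs = list(buildings)  # consume the iterable exactly once
--     total = 0
--     w = 1
--     for b in reversed(bs):  # back-to-front weighted sum: weight 8**(position from the right)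
--         total += b * w
--         w *= 8
--     return clue * w + total
-- ===== Notes on version B (the rewrite author's own statement) =====
-- stated objective: alternative
-- what changed: Replaces the forward Horner shift-accumulate with a back-to-front positional weighted sum: each building is multiplied by its base-8 place value (maintained as a second accumulator) and clue by 8^n, then summed.
import Mathlib
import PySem

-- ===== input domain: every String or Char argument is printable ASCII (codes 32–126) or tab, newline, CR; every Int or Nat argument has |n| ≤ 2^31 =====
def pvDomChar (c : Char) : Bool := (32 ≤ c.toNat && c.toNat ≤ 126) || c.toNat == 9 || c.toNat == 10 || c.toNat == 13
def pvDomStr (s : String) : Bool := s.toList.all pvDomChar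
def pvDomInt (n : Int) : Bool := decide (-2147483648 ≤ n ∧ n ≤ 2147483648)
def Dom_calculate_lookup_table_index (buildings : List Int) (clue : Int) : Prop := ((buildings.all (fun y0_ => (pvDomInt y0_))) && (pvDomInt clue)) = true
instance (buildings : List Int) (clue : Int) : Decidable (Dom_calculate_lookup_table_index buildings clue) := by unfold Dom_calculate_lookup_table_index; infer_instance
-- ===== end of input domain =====

-- B replaces A's forward Horner shift-accumulate with a back-to-front positional weighted sum (alternative decomposition, same cost).


-- ===== PORT A =====
-- x << 3 on Python ints equals x * 8 exactly (also for negative x)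
def calculate_lookup_table_index (buildings : List Int) (clue : Int) : Int :=
  let i0 : Int := 0
  let i1 := i0 * 8
  let i2 := i1 + clue
  buildings.foldl (fun acc b => acc * 8 + b) i2

-- ===== PORT B =====
def calculate_lookup_table_index_alt (buildings : List Int) (clue : Int) : Int :=
  let bs := buildings
  -- back-to-front weighted sum; state = (total, current place value w)
  let p := bs.reverse.foldl (fun (st : Int × Int) b => (st.1 + b * st.2, st.2 * 8)) (0, 1)
  clue * p.2 + p.1

-- ===== PRECONDITION & SPEC =====
def Spec_calculate_lookup_table_index (buildings : List Int) (clue : Int) (out : Int) : Prop := out = calculate_lookup_table_index_alt buildings clue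
instance (buildings : List Int) (clue : Int) (out : Int) : Decidable (Spec_calculate_lookup_table_index buildings clue out) := by unfold Spec_calculate_lookup_table_index; infer_instance

-- ===== CLAIM (what is proved, stated in full; the proofs are below) =====
def Claim_equal_calculate_lookup_table_index : Prop := ∀ (buildings : List Int) (clue : Int), Dom_calculate_lookup_table_index buildings clue → Spec_calculate_lookup_table_index buildings clue (calculate_lookup_table_index buildings clue)

-- ===== LEMMAS AND PROOFS =====

/-- value of the digit list alone: Σ b_i * 8^(n-1-i), structurally. -/
def pvVal : List Int → Int
  | [] => 0
  | b :: t => b * 8 ^ t.length + pvVal t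

theorem pvHorner (bs : List Int) (acc : Int) :
    bs.foldl (fun a b => a * 8 + b) acc = acc * 8 ^ bs.length + pvVal bs := by
  induction bs generalizing acc with
  | nil => simp [pvVal]
  | cons b t ih => simp [List.foldl, ih, pvVal, pow_succ]; ring

theorem pvWeighted (bs : List Int) :
    bs.reverse.foldl (fun (st : Int × Int) b => (st.1 + b * st.2, st.2 * 8)) (0, 1)
      = (pvVal bs, 8 ^ bs.length) := by
  induction bs with
  | nil => simp [pvVal]
  | cons b t ih =>
      rw [List.reverse_cons, List.foldl_append, ih]
      simp [pvVal, pow_succ]; ring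

-- ===== VERDICT (by name: the statement is the Claim_ definition above) =====
theorem calculate_lookup_table_index_spec : Claim_equal_calculate_lookup_table_index := by
  intro bs clue _
  unfold Spec_calculate_lookup_table_index calculate_lookup_table_index calculate_lookup_table_index_alt
  simp only []
  rw [pvHorner, pvWeighted]
  simp
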